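-- pv_equiv track=rewrite | github.com/zmallen/blip | blip/blip.py | get_blips
-- ===== SOURCE A (Python) =====
-- def replace_char_at(s, index, char):
--     s_list = list(s)
--     s_list[index] = char
--     return ''.join(s_list)
--
-- def get_blips(s):
--     flip_dict = {
--         '0': '1',
--         '1': '0'
--     }
--     blips = []
--     binary = [format(ord(x), '08b') for x in s]
--     blips.append(binary)
--     for i,byte in enumerate(binary):
--         for n,bit in enumerate(byte):
--             temp_binary = binary[:]
--             temp_byte = replace_char_at(byte, n, flip_dict[bit])
--             temp_binary[i] = temp_byte
--             blips.append(temp_binary)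
--     return blips
-- ===== SOURCE B (Python) =====
-- def get_blips(s):
--     full = ''.join(format(ord(c), '08b') for c in s)
--
--     def chunk(bits):
--         return [bits[k:k + 8] for k in range(0, len(bits), 8)]
--
--     res = [chunk(full)]
--     prefix, suffix = '', full
--     while suffix:
--         b, suffix = suffix[0], suffix[1:]
--         res.append(chunk(prefix + ('1' if b == '0' else '0') + suffix))
--         prefix += b
--     return res
-- ===== Notes on version B (the rewrite author's own statement) =====
-- stated objective: alternative
-- what changed: B joins the whole encoding into one flat bit-string and walks it with a prefix/suffix zipper (no indices, no nested loops): each step pops the next bit, emits prefix + flipped bit + remaining suffix re-chunked into 8-character bytes, whereas A runs nested byte/bit index loops patching a copied list of byte-strings in place.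
import Mathlib
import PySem

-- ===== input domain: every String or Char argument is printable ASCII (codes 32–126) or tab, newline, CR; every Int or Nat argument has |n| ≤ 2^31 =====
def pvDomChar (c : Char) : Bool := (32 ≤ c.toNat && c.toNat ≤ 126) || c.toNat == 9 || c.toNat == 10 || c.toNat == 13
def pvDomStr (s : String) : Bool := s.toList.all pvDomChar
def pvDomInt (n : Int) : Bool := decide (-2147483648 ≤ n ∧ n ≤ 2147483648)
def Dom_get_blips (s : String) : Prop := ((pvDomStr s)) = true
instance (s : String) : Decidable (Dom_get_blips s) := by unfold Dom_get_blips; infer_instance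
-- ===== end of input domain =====

-- B joins the encoding into ONE flat bit-string and walks it with a prefix/suffix zipper,
-- re-chunking into 8-character bytes at each step, instead of A's nested byte/bit index
-- loops patching a copied list of byte-strings; objective: alternative (same asymptotic cost).

-- ===== PORT A =====
-- format(ord(x), '08b'): exact for code points < 256 (every char in Dom); both Pythons call
-- the same builtin format expression, so both ports share this helper.
def pvFmt08bNat (v : Nat) : String :=
  String.ofList ((List.range 8).map (fun k => if v / 2 ^ (7 - k) % 2 = 1 then '1' else '0'))

def pvFmt08b (c : Char) : String := pvFmt08bNat c.toNat

-- flip_dict[bit]: bit is always '0' or '1' here, so the dict lookup is this function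
def pvFlip (bit : Char) : Char := if bit = '0' then '1' else '0'

-- s_list[index] = char; index is always in range at every call site, where List.set is exact
def replace_char_at (s : String) (index : Nat) (char : Char) : String :=
  String.ofList (s.toList.set index char)

def get_blips (s : String) : List (List String) :=
  let binary := s.toList.map (fun x => pvFmt08b x)
  let blips := [binary]
  (PySem.List.enumerate binary 0).foldl (fun blips ib =>
    (PySem.List.enumerate ib.2.toList 0).foldl (fun blips nb =>
      let temp_binary := binary
      let temp_byte := replace_char_at ib.2 nb.1.toNat (pvFlip nb.2)
      blips ++ [temp_binary.set ib.1.toNat temp_byte]) blips) blips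

-- ===== PORT B =====
-- chunk(bits) = [bits[k:k+8] for k in range(0, len(bits), 8)]; strings carried as List Char
def pvChunk8 (bits : List Char) : List String :=
  (PySem.List.pyRange 0 bits.length 8).map
    (fun k => String.ofList (PySem.List.slice bits (some k) (some (k + 8))))

-- the while-loop over (prefix, suffix): pop a bit, emit prefix + flipped bit + suffix re-chunked
def pvZip (pre : List Char) : List Char → List (List String)
  | [] => []
  | b :: rest => pvChunk8 (pre ++ pvFlip b :: rest) :: pvZip (pre ++ [b]) rest

def get_blips_alt (s : String) : List (List String) :=
  let full := s.toList.flatMap (fun c => (pvFmt08b c).toList)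
  pvChunk8 full :: pvZip [] full

-- ===== PRECONDITION & SPEC =====
def Spec_get_blips (s : String) (out : List (List String)) : Prop := out = get_blips_alt s
instance (s : String) (out : List (List String)) : Decidable (Spec_get_blips s out) := by unfold Spec_get_blips; infer_instance

-- ===== CLAIM (what is proved, stated in full; the proofs are below) =====
def Claim_equal_get_blips : Prop := ∀ (s : String), Dom_get_blips s → Spec_get_blips s (get_blips s)

-- ===== LEMMAS AND PROOFS =====

theorem pvFmt08bNat_len (v : Nat) : (pvFmt08bNat v).toList.length = 8 := by
  simp [pvFmt08bNat]

theorem pvChunk8_nil : pvChunk8 [] = [] := by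
  simp [pvChunk8, PySem.List.pyRange_of_pos 0 0 (by norm_num : (0:Int) < 8)]

theorem pvChunk8_block (a rest : List Char) (ha : a.length = 8) :
    pvChunk8 (a ++ rest) = String.ofList a :: pvChunk8 rest := by
  unfold pvChunk8
  rw [PySem.List.pyRange_of_pos 0 _ (by norm_num : (0:Int) < 8),
    PySem.List.pyRange_of_pos 0 _ (by norm_num : (0:Int) < 8)]
  have hN : (if (0:Int) < ((a ++ rest).length : Int)
        then ((((a ++ rest).length : Int) - 0 + 8 - 1) / 8).toNat else 0)
      = (if (0:Int) < (rest.length : Int)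
        then (((rest.length : Int) - 0 + 8 - 1) / 8).toNat else 0) + 1 := by
    simp only [List.length_append, ha]
    push_cast
    split_ifs <;> omega
  rw [hN, List.range_succ_eq_map]
  simp only [List.map_cons, List.map_map]
  congr 1
  · -- head chunk is bits[0:8] = a
    show String.ofList (PySem.List.slice (a ++ rest)
        (some (0 + 8 * ((0 : Nat) : Int))) (some (0 + 8 * ((0 : Nat) : Int) + 8))) = _
    rw [show (0 + 8 * ((0 : Nat) : Int)) = ((0 : Nat) : Int) by norm_num,
      show (((0 : Nat) : Int) + 8) = (((0 : Nat) : Int) + ((8 : Nat) : Int)) by norm_num,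
      PySem.List.slice_natCast_add, List.drop_zero,
      List.take_append_of_le_length (by omega), ← ha, List.take_length]
  · -- chunk j+1 of a ++ rest is chunk j of rest
    apply List.map_congr_left
    intro j _
    show String.ofList (PySem.List.slice (a ++ rest)
          (some (0 + 8 * ((j + 1 : Nat) : Int))) (some (0 + 8 * ((j + 1 : Nat) : Int) + 8)))
        = String.ofList (PySem.List.slice rest
          (some (0 + 8 * ((j : Nat) : Int))) (some (0 + 8 * ((j : Nat) : Int) + 8)))
    rw [show (0 + 8 * ((j + 1 : Nat) : Int)) = ((8 * j + 8 : Nat) : Int) by push_cast; ring,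
      show (((8 * j + 8 : Nat) : Int) + 8) = (((8 * j + 8 : Nat) : Int) + ((8 : Nat) : Int)) by norm_num,
      PySem.List.slice_natCast_add,
      show (0 + 8 * ((j : Nat) : Int)) = ((8 * j : Nat) : Int) by push_cast; ring,
      show (((8 * j : Nat) : Int) + 8) = (((8 * j : Nat) : Int) + ((8 : Nat) : Int)) by norm_num,
      PySem.List.slice_natCast_add,
      List.drop_append, List.drop_eq_nil_of_le (by omega), List.nil_append, ha,
      show 8 * j + 8 - 8 = 8 * j by omega]

-- re-chunking a concatenation of 8-char blocks recovers exactly those blocks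
theorem pvChunk8_flat (l : List String) (h : ∀ x ∈ l, x.toList.length = 8) :
    pvChunk8 (l.flatMap String.toList) = l := by
  induction l with
  | nil => simpa using pvChunk8_nil
  | cons a l ih =>
    rw [List.flatMap_cons, pvChunk8_block _ _ (h a (by simp)), String.ofList_toList,
      ih (fun x hx => h x (by simp [hx]))]

-- the zipper walking byte i0's bits from position n0 onward
theorem pvZip_inner (binary : List String) (hlen : ∀ x ∈ binary, x.toList.length = 8)
    (i0 : Nat) (byte : String) (hb : binary[i0]? = some byte) :
    ∀ (u : List Char) (n0 : Nat), byte.toList.drop n0 = u →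
    pvZip ((binary.take i0).flatMap String.toList ++ byte.toList.take n0)
        (u ++ (binary.drop (i0 + 1)).flatMap String.toList)
      = (PySem.List.enumerate u (n0 : Int)).map
          (fun nb => binary.set i0 (replace_char_at byte nb.1.toNat (pvFlip nb.2)))
        ++ pvZip ((binary.take (i0 + 1)).flatMap String.toList)
            ((binary.drop (i0 + 1)).flatMap String.toList) := by
  have hi0 : i0 < binary.length := by
    by_contra h; rw [List.getElem?_eq_none (by omega)] at hb; simp at hb
  have hby : byte.toList.length = 8 := hlen byte (List.mem_of_getElem? hb)
  have htake1 : binary.take (i0 + 1) = binary.take i0 ++ [byte] := by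
    rw [List.take_add_one, hb]; rfl
  intro u
  induction u with
  | nil =>
    intro n0 hdrop
    have hn0 : 8 ≤ n0 := by
      by_contra h
      have := congrArg List.length hdrop
      simp [hby] at this; omega
    have : byte.toList.take n0 = byte.toList := List.take_of_length_le (by omega)
    rw [this, PySem.List.enumerate_nil, List.map_nil, List.nil_append, List.nil_append,
      htake1, List.flatMap_append]
    simp
  | cons b u' ih =>
    intro n0 hdrop
    have hn0 : n0 < 8 := by
      by_contra h
      rw [List.drop_eq_nil_of_le (by omega)] at hdrop; simp at hdrop
    have hbn : byte.toList[n0]? = some b := by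
      have h := congrArg (fun l => l[0]?) hdrop
      simpa [List.getElem?_drop] using h
    rw [List.cons_append, pvZip, PySem.List.enumerate_cons, List.map_cons]
    congr 1
    · -- emitted element = binary with byte i0's bit n0 flipped, re-chunked
      have hset : byte.toList.take n0 ++ pvFlip b :: u' = byte.toList.set n0 (pvFlip b) := by
        rw [List.set_eq_take_append_cons_drop, if_pos (by simp only [String.length_toList] at hby ⊢; omega)]
        have : byte.toList.drop (n0 + 1) = u' := by
          have h1 : byte.toList.drop (n0 + 1) = (byte.toList.drop n0).tail := by
            rw [← List.drop_drop]; simp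
          rw [h1, hdrop]; simp
        rw [this]
      have hsetbin : binary.set i0 (String.ofList (byte.toList.set n0 (pvFlip b)))
          = binary.take i0 ++ String.ofList (byte.toList.set n0 (pvFlip b))
            :: binary.drop (i0 + 1) := by
        rw [List.set_eq_take_append_cons_drop, if_pos hi0]
      have hflat : (binary.take i0).flatMap String.toList
            ++ (byte.toList.take n0 ++ pvFlip b :: u')
            ++ (binary.drop (i0 + 1)).flatMap String.toList
          = (binary.set i0 (String.ofList (byte.toList.set n0 (pvFlip b)))).flatMap
              String.toList := by
        rw [hset, hsetbin, List.flatMap_append, List.flatMap_cons]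
        simp
      calc pvChunk8 ((binary.take i0).flatMap String.toList ++ byte.toList.take n0
              ++ (pvFlip b :: (u' ++ (binary.drop (i0 + 1)).flatMap String.toList)))
          = pvChunk8 ((binary.take i0).flatMap String.toList
              ++ (byte.toList.take n0 ++ pvFlip b :: u')
              ++ (binary.drop (i0 + 1)).flatMap String.toList) := by
            congr 1; simp
        _ = binary.set i0 (replace_char_at byte ((n0 : Int)).toNat (pvFlip b)) := by
            rw [hflat, pvChunk8_flat]
            · rfl
            · intro x hx
              rcases List.mem_or_eq_of_mem_set hx with h | h
              · exact hlen x h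
              · subst h; simp [hby]
    · -- tail: advance the zipper one bit
      have htk : byte.toList.take (n0 + 1) = byte.toList.take n0 ++ [b] := by
        rw [List.take_add_one, hbn]; rfl
      have hdrop' : byte.toList.drop (n0 + 1) = u' := by
        have h1 : byte.toList.drop (n0 + 1) = (byte.toList.drop n0).tail := by
          rw [← List.drop_drop]; simp
        rw [h1, hdrop]; simp
      have h := ih (n0 + 1) hdrop'
      rw [htk, ← List.append_assoc,
        show ((n0 + 1 : Nat) : Int) = (n0 : Int) + 1 by push_cast; ring] at h
      exact h

-- the zipper from byte boundary i0 = A's remaining nested loops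
theorem pvZip_outer (binary : List String) (hlen : ∀ x ∈ binary, x.toList.length = 8) :
    ∀ (rest : List String) (i0 : Nat), binary.drop i0 = rest →
    pvZip ((binary.take i0).flatMap String.toList) (rest.flatMap String.toList)
      = (PySem.List.enumerate rest (i0 : Int)).flatMap
          (fun ib => (PySem.List.enumerate ib.2.toList 0).map
            (fun nb => binary.set ib.1.toNat
              (replace_char_at ib.2 nb.1.toNat (pvFlip nb.2)))) := by
  intro rest
  induction rest with
  | nil => intro i0 _; simp [PySem.List.enumerate_nil, pvZip]
  | cons byte rest' ih =>
    intro i0 hdrop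
    have hb : binary[i0]? = some byte := by
      have h := congrArg (fun l => l[0]?) hdrop
      simpa [List.getElem?_drop] using h
    have hdrop' : binary.drop (i0 + 1) = rest' := by
      have h1 : binary.drop (i0 + 1) = (binary.drop i0).tail := by
        rw [← List.drop_drop]; simp
      rw [h1, hdrop]; simp
    rw [List.flatMap_cons, PySem.List.enumerate_cons, List.flatMap_cons]
    have hinner := pvZip_inner binary hlen i0 byte hb byte.toList 0 (by simp)
    simp only [List.take_zero, List.append_nil, Nat.cast_zero, hdrop'] at hinner
    rw [hinner]
    refine congrArg₂ (· ++ ·) rfl ?_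
    rw [show ((i0 : Int) + 1) = ((i0 + 1 : Nat) : Int) by push_cast; ring,
      ih (i0 + 1) hdrop']

-- ===== VERDICT (by name: the statement is the Claim_ definition above) =====
theorem get_blips_spec : Claim_equal_get_blips := by
  unfold Claim_equal_get_blips Spec_get_blips
  intro s _
  simp only [get_blips, get_blips_alt]
  simp only [PySem.List.foldl_append_singleton_eq_map, PySem.List.foldl_append_eq_flatMap]
  have hfull : s.toList.flatMap (fun c => (pvFmt08b c).toList)
      = (s.toList.map (fun x => pvFmt08b x)).flatMap String.toList := by
    rw [List.flatMap_map]
  have hlen : ∀ x ∈ s.toList.map (fun x => pvFmt08b x), x.toList.length = 8 := by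
    intro x hx
    rcases List.mem_map.1 hx with ⟨c, _, rfl⟩
    exact pvFmt08bNat_len c.toNat
  rw [hfull, pvChunk8_flat _ hlen]
  refine congrArg₂ List.cons rfl ?_
  have h := pvZip_outer (s.toList.map (fun x => pvFmt08b x)) hlen
    (s.toList.map (fun x => pvFmt08b x)) 0 (by simp)
  simp only [List.take_zero, List.flatMap_nil, Nat.cast_zero] at h
  simpa using h.symm
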